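-- pv_equiv track=rewrite | github.com/pJqEM5Kj/stuff | PythonApplication1/PythonApplication1/module1.py | funcOptimized
-- ===== SOURCE A (Python) =====
-- def funcOptimized(x, digitCount):
--     sum = 0
--     digitCutter, _ = fastPow(10, digitCount)
--     for i in range(1, x):
--         tmp, _ = fastPow2(i, i, digitCount)
--         sum += tmp
--         sum %= digitCutter
--     return sum
--
-- def getNotZeroBitPositions(num):
--     b = 1
--     c = 0
--     powers = []
--     while b <= num:
--         tmp = num & b
--         if tmp:
--             powers.append(c)
--         c += 1
--         b <<= 1
--     return list(reversed(powers))
--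
-- def fastPow(base, power):
--     if power == 0:
--         return (1, 0)
--
--     powers = getNotZeroBitPositions(power)
--
--     #checkAndVisualizeSplit(power, powers)
--
--     multCount = 0
--     highestPower = powers[0]
--     lowPowers = powers[1:]
--     powers_dict = { p : None for p in lowPowers }
--     res = base
--     for p in range(highestPower):
--         if p in powers_dict:
--             powers_dict[p] = res
--         res *= res
--         multCount += 1
--
--     for p in lowPowers:
--         res *= powers_dict[p]
--         multCount += 1
--
--     return (res, multCount)
--
-- def fastPow2(base, power, digitsCount):
--     if power == 0:
--         return (1, 0)
--
--     digitCutter, _ = fastPow(10, digitsCount)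
--
--     powers = getNotZeroBitPositions(power)
--
--     #checkAndVisualizeSplit(power, powers)
--
--     multCount = 0
--     highestPower = powers[0]
--     lowPowers = powers[1:]
--     powers_dict = { p : None for p in lowPowers }
--     res = base % digitCutter
--     for p in range(highestPower):
--         if p in powers_dict:
--             powers_dict[p] = res
--         res *= res
--         res %= digitCutter
--         multCount += 1
--
--     for p in lowPowers:
--         res *= powers_dict[p]
--         res %= digitCutter
--         multCount += 1
--
--     return (res, multCount)
-- ===== SOURCE B (Python) =====
-- def funcOptimized(x, digitCount):
--     m = 10 ** digitCount
--     total = 0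
--     for i in range(1, x):
--         res, b, e = 1, i, i
--         while e > 0:
--             if e % 2 == 1:
--                 res = res * b % m
--             b = b * b % m
--             e //= 2
--         total = (total + res) % m
--     return total
-- ===== Notes on version B (the rewrite author's own statement) =====
-- stated objective: simpler
-- what changed: Replaced the bit-position-list + saved-squares-dictionary left-to-right fast exponentiation (getNotZeroBitPositions/fastPow/fastPow2) by an inline right-to-left (Russian-peasant) modular exponentiation loop; no helper functions, no dict, no bit list.
import Mathlib
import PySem

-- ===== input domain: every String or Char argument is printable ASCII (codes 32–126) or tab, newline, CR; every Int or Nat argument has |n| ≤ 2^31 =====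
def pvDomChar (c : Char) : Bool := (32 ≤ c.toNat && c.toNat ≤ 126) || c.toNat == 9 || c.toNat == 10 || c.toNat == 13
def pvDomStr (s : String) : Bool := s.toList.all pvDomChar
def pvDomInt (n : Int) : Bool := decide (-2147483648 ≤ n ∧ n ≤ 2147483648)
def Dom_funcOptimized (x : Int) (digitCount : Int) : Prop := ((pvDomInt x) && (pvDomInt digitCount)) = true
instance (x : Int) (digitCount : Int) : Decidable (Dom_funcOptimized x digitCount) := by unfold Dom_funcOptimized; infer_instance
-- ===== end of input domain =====

-- B replaces A's bit-decomposition fast exponentiation by a naive modular product loop; same results, no speed claim.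

-- ===== PORT A =====
-- while b <= num: ... b <<= 1  (the '1 ≤ b' conjunct is a totality guard only: every call has b ≥ 1;
-- Int.land num b is Python's num & b on ints)
def gnzAux (num b c : Int) (powers : List Int) : List Int :=
  if h : 1 ≤ b ∧ b ≤ num then
    gnzAux num (b * 2) (c + 1) (if Int.land num b ≠ 0 then powers ++ [c] else powers)
  else powers
termination_by (num + 1 - b).toNat
decreasing_by omega

def getNotZeroBitPositions (num : Int) : List Int :=
  (gnzAux num 1 0 []).reverse

-- decomposition of the reversed bit list

-- fastPow; `none` exactly where Python raises (powers[0] IndexError, or a None value in `res *= powers_dict[p]`)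
def fastPowA (base power : Int) : Option (Int × Int) :=
  if power = 0 then some (1, 0) else
  match getNotZeroBitPositions power with
  | [] => none
  | highestPower :: lowPowers =>
    let powersDict : PySem.Dict Int (Option Int) :=
      lowPowers.foldl (fun d p => d.insert p none) PySem.Dict.empty
    let st := (PySem.List.pyRange 0 highestPower 1).foldl
      (fun (st : Int × Int × PySem.Dict Int (Option Int)) p =>
        let d' := if st.2.2.contains p then st.2.2.insert p (some st.1) else st.2.2
        (st.1 * st.1, st.2.1 + 1, d'))
      (base, 0, powersDict)
    lowPowers.foldl
      (fun (acc : Option (Int × Int)) p =>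
        acc.bind (fun rm =>
          match st.2.2.get? p with
          | some (some v) => some (rm.1 * v, rm.2 + 1)
          | _ => none))
      (some (st.1, st.2.1))

-- fastPow2: same with res %= digitCutter after each multiplication (Python % with a positive divisor = Int emod)
def fastPow2A (base power digitsCount : Int) : Option (Int × Int) :=
  if power = 0 then some (1, 0) else
  match fastPowA 10 digitsCount with
  | none => none
  | some dc =>
    match getNotZeroBitPositions power with
    | [] => none
    | highestPower :: lowPowers =>
      let powersDict : PySem.Dict Int (Option Int) :=
        lowPowers.foldl (fun d p => d.insert p none) PySem.Dict.empty
      let st := (PySem.List.pyRange 0 highestPower 1).foldl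
        (fun (st : Int × Int × PySem.Dict Int (Option Int)) p =>
          let d' := if st.2.2.contains p then st.2.2.insert p (some st.1) else st.2.2
          (st.1 * st.1 % dc.1, st.2.1 + 1, d'))
        (base % dc.1, 0, powersDict)
      lowPowers.foldl
        (fun (acc : Option (Int × Int)) p =>
          acc.bind (fun rm =>
            match st.2.2.get? p with
            | some (some v) => some (rm.1 * v % dc.1, rm.2 + 1)
            | _ => none))
        (some (st.1, st.2.1))

def funcOptimized (x : Int) (digitCount : Int) : Int :=
  (match fastPowA 10 digitCount with
   | none => none
   | some dc =>
     (PySem.List.pyRange 1 x 1).foldl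
       (fun (acc : Option Int) i =>
         acc.bind (fun s =>
           match fastPow2A i i digitCount with
           | none => none
           | some t => some ((s + t.1) % dc.1)))
       (some 0)).getD 0

-- ===== PORT B =====
-- m = 10 ** digitCount (an int exactly when digitCount ≥ 0, i.e. on Pre_)
-- while e > 0: if e % 2 == 1: res = res*b%m; b = b*b%m; e //= 2   ('0 < e' is the loop condition itself)
def powLoop (m res b e : Int) : Int :=
  if h : 0 < e then
    powLoop m (if PySem.Int.mod e 2 = 1 then res * b % m else res) (b * b % m)
      (PySem.Int.floordiv e 2)
  else res
termination_by e.toNat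
decreasing_by
  rw [PySem.Int.floordiv_eq_ediv_of_pos (by omega)]
  omega

def funcOptimized_alt (x : Int) (digitCount : Int) : Int :=
  let m : Int := 10 ^ digitCount.toNat
  (PySem.List.pyRange 1 x 1).foldl
    (fun total i => (total + powLoop m 1 i i) % m) 0

-- ===== PRECONDITION & SPEC =====
-- Pre_ excludes digitCount < 0, on which A raises IndexError (powers[0] of the empty bit list) and returns no value.
def Pre_funcOptimized (x : Int) (digitCount : Int) : Prop := 0 ≤ digitCount
instance (x : Int) (digitCount : Int) : Decidable (Pre_funcOptimized x digitCount) := by unfold Pre_funcOptimized; infer_instance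
def pvWitness_funcOptimized : Int × Int := (7, 2)

def Spec_funcOptimized (x : Int) (digitCount : Int) (out : Int) : Prop := out = funcOptimized_alt x digitCount
instance (x : Int) (digitCount : Int) (out : Int) : Decidable (Spec_funcOptimized x digitCount out) := by unfold Spec_funcOptimized; infer_instance

-- ===== CLAIM (what is proved, stated in full; the proofs are below) =====
def Claim_equal_funcOptimized : Prop := ∀ (x : Int) (digitCount : Int), Dom_funcOptimized x digitCount → Pre_funcOptimized x digitCount → Spec_funcOptimized x digitCount (funcOptimized x digitCount)

-- ===== LEMMAS AND PROOFS =====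
-- ascending list of the set bit positions of n that are ≥ c
def bitsFrom (n c : Nat) : List Int :=
  if h : 2 ^ c ≤ n then
    (if n.testBit c then [(c : Int)] else []) ++ bitsFrom n (c + 1)
  else []
termination_by n + 1 - 2 ^ c
decreasing_by
  have h1 : 2 ^ c < 2 ^ (c + 1) := Nat.pow_lt_pow_right (by omega) (by omega)
  omega

lemma land_two_pow_ne (n c : Nat) :
    (Int.land (n : Int) ((2:Int) ^ c) ≠ 0) ↔ n.testBit c := by
  have h1 : ((2:Int) ^ c) = ((2 ^ c : Nat) : Int) := by push_cast; ring
  have h2 : Int.land (n : Int) ((2 ^ c : Nat) : Int) = ((n &&& 2 ^ c : Nat) : Int) := rfl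
  rw [h1, h2, Nat.and_two_pow]
  cases h : n.testBit c <;> simp

lemma gnzAux_eq (num : Int) (hnum : 0 ≤ num) :
    ∀ (c : Nat) (acc : List Int),
      gnzAux num (2 ^ c) c acc = acc ++ bitsFrom num.toNat c := by
  have key : ∀ (k : Nat) (c : Nat) (acc : List Int), (num + 1 - 2 ^ c).toNat ≤ k →
      gnzAux num (2 ^ c) c acc = acc ++ bitsFrom num.toNat c := by
    intro k
    induction k with
    | zero =>
      intro c acc hle
      have hb : ¬ ((2:Int) ^ c ≤ num) := by
        have : (0:Int) < 2 ^ c := by positivity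
        omega
      have hb' : ¬ (2 ^ c ≤ num.toNat) := by
        intro h
        apply hb
        have : ((2 ^ c : Nat) : Int) ≤ (num.toNat : Int) := by exact_mod_cast h
        push_cast at this; omega
      rw [gnzAux, bitsFrom]
      simp [hb, hb']
    | succ k ih =>
      intro c acc hle
      rw [gnzAux, bitsFrom]
      by_cases hb : (2:Int) ^ c ≤ num
      · have hb1 : (1:Int) ≤ 2 ^ c := one_le_pow₀ (by norm_num)
        have hb'' : 2 ^ c ≤ num.toNat := by
          have : ((2:Int) ^ c) = ((2 ^ c : Nat) : Int) := by push_cast; ring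
          omega
        have hrec : (2:Int) ^ c * 2 = 2 ^ (c + 1) := by ring
        have hc : ((c:Int) + 1) = ((c + 1 : Nat) : Int) := by push_cast; ring
        have hmeas : (num + 1 - 2 ^ (c+1)).toNat ≤ k := by
          have h1 : (2:Int) ^ c < 2 ^ (c + 1) := by
            have := pow_lt_pow_right₀ (a := (2:Int)) (by norm_num) (Nat.lt_succ_self c)
            exact this
          omega
        have hland : (Int.land num ((2:Int)^c) ≠ 0) ↔ num.toNat.testBit c := by
          have hn : ((num.toNat : Nat) : Int) = num := Int.toNat_of_nonneg hnum
          rw [← hn]; exact land_two_pow_ne num.toNat c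
        rw [dif_pos ⟨by omega, hb⟩, dif_pos hb'', hrec, hc]
        by_cases ht : num.toNat.testBit c
        · rw [if_pos (by simpa [hland] using ht), if_pos ht,
              ih (c+1) (acc ++ [(c:Int)]) hmeas, List.append_assoc]
        · rw [if_neg (by simpa [hland] using ht), if_neg ht,
              ih (c+1) acc hmeas, List.nil_append]
      · have hb' : ¬ (2 ^ c ≤ num.toNat) := by
          intro h
          apply hb
          have : ((2 ^ c : Nat) : Int) ≤ (num.toNat : Int) := by exact_mod_cast h
          push_cast at this; omega
        simp [hb, hb']
  intro c acc; exact key _ c acc le_rfl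

lemma bitsFrom_nonneg (n : Nat) : ∀ (c : Nat), ∀ p ∈ bitsFrom n c, (c : Int) ≤ p ∧ 0 ≤ p := by
  intro c
  fun_induction bitsFrom n c with
  | case1 c h ih =>
    intro p hp
    rw [List.mem_append] at hp
    rcases hp with hp | hp
    · split at hp <;> simp_all
    · have := ih p hp; constructor <;> omega
  | case2 c h => simp

lemma bitsFrom_pairwise (n : Nat) : ∀ (c : Nat), (bitsFrom n c).Pairwise (· < ·) := by
  intro c
  fun_induction bitsFrom n c with
  | case1 c h ih =>
    rw [List.pairwise_append]
    refine ⟨by split <;> simp, ih, ?_⟩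
    intro a ha b hb
    have hbge := (bitsFrom_nonneg n (c+1) b hb).1
    split at ha <;> simp_all
  | case2 c h => simp

lemma bitsFrom_sum (n : Nat) : ∀ (c : Nat),
    ((bitsFrom n c).map (fun p => 2 ^ p.toNat)).sum = (n / 2 ^ c * 2 ^ c : Nat) := by
  intro c
  fun_induction bitsFrom n c with
  | case1 c h ih =>
    rw [List.map_append, List.sum_append, ih]
    have hq : n / 2 ^ (c+1) = n / 2 ^ c / 2 := by
      rw [Nat.pow_succ, Nat.div_div_eq_div_mul]
    have ht : n.testBit c = decide (n / 2 ^ c % 2 = 1) := Nat.testBit_eq_decide_div_mod_eq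
    have hp : (2:Nat) ^ (c+1) = 2 ^ c * 2 := Nat.pow_succ 2 c
    split
    · rename_i htb
      have h1 : n / 2 ^ c % 2 = 1 := by rw [ht] at htb; simpa using htb
      obtain ⟨m, hm⟩ : ∃ m, n / 2 ^ c = 2 * m + 1 := ⟨n / 2 ^ c / 2, by omega⟩
      simp only [List.map_cons, List.map_nil, List.sum_cons, List.sum_nil, Int.toNat_natCast]
      rw [hq, hp, hm, show (2*m+1)/2 = m by omega]
      ring
    · rename_i htb
      have h1 : n / 2 ^ c % 2 = 0 := by rw [ht] at htb; simp at htb; omega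
      obtain ⟨m, hm⟩ : ∃ m, n / 2 ^ c = 2 * m := ⟨n / 2 ^ c / 2, by omega⟩
      simp only [List.map_nil, List.sum_nil, Nat.zero_add]
      rw [hq, hp, hm, show (2*m)/2 = m by omega]
      ring
  | case2 c h =>
    have : n / 2 ^ c = 0 := Nat.div_eq_of_lt (by omega)
    simp [this]

lemma foldl_insert_none_get? (low : List Int) :
    ∀ (d : PySem.Dict Int (Option Int)) (q : Int),
      ((low.foldl (fun d p => d.insert p none) d).get? q)
        = if q ∈ low then some none else d.get? q := by
  induction low with
  | nil => intro d q; simp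
  | cons p l ih =>
    intro d q
    rw [List.foldl_cons, ih]
    by_cases hql : q ∈ l
    · simp [hql]
    · by_cases hqp : q = p
      · simp [hql, hqp, PySem.Dict.get?_insert_self]
      · simp [hql, hqp, PySem.Dict.get?_insert]

lemma sqLoop_spec (sq : Int → Int) (val : Nat → Int)
    (hval : ∀ t, val (t + 1) = sq (val t)) (init : Int) (hv0 : val 0 = init)
    (low : List Int) (hlow : ∀ q ∈ low, 0 ≤ q)
    (d0 : PySem.Dict Int (Option Int))
    (hd0 : ∀ q, d0.get? q = if q ∈ low then some none else none)
    (n : Nat) :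
    ∃ dct : PySem.Dict Int (Option Int),
      (PySem.List.pyRange 0 (n : Int) 1).foldl
        (fun (st : Int × Int × PySem.Dict Int (Option Int)) p =>
          let d' := if st.2.2.contains p then st.2.2.insert p (some st.1) else st.2.2
          (sq st.1, st.2.1 + 1, d'))
        (init, 0, d0)
      = (val n, (n : Int), dct)
      ∧ ∀ q : Int, dct.get? q =
          if q ∈ low ∧ q < (n : Int) then some (some (val q.toNat)) else d0.get? q := by
  subst hv0
  induction n with
  | zero =>
    refine ⟨d0, by simp [PySem.List.pyRange_one_eq_nil], ?_⟩
    intro q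
    by_cases hq : q ∈ low
    · have := hlow q hq
      simp [hq, show ¬ (q < (0:Int)) by omega]
    · simp [hq]
  | succ n ih =>
    obtain ⟨dct, h1, h2⟩ := ih
    have hsplit : PySem.List.pyRange 0 ((n+1 : Nat) : Int) 1
        = PySem.List.pyRange 0 (n : Int) 1 ++ [(n : Int)] := by
      push_cast
      exact PySem.List.pyRange_one_succ_right (by omega)
    rw [hsplit, List.foldl_append, h1]
    simp only []
    have hget : dct.get? (n : Int) = if (n : Int) ∈ low then some none else none := by
      rw [h2]
      simp [hd0]
    by_cases hm : (n : Int) ∈ low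
    · have hcont : dct.contains (n : Int) = true := by
        rw [PySem.Dict.contains_eq_isSome_get?, hget]
        simp [hm]
      refine ⟨dct.insert (n : Int) (some (val n)), ?_, ?_⟩
      · simp [hcont, hval, Nat.cast_add]
      · intro q
        rw [PySem.Dict.get?_insert]
        by_cases hq : q = (n : Int)
        · subst hq
          simp [hm, show ((n:Int) < (n:Nat) + 1) by push_cast; omega]
        · rw [if_neg hq, h2]
          by_cases hql : q ∈ low
          · have hiff : (q ∈ low ∧ q < ((n:Nat) : Int)) ↔ (q ∈ low ∧ q < (((n+1:Nat)) : Int)) := by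
              push_cast at *
              constructor <;> (intro h; exact ⟨h.1, by omega⟩)
            exact if_congr hiff rfl rfl
          · simp [hql]
    · have hcont : dct.contains (n : Int) = false := by
        rw [PySem.Dict.contains_eq_isSome_get?, hget]
        simp [hm]
      refine ⟨dct, ?_, ?_⟩
      · simp [hcont, hval, Nat.cast_add]
      · intro q
        rw [h2]
        by_cases hq : q = (n : Int)
        · subst hq; simp [hm]
        · by_cases hql : q ∈ low
          · have hiff : (q ∈ low ∧ q < ((n:Nat) : Int)) ↔ (q ∈ low ∧ q < (((n+1:Nat)) : Int)) := by
              have hne : q ≠ ((n:Nat) : Int) := hq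
              push_cast at *
              constructor <;> (intro h; exact ⟨h.1, by omega⟩)
            exact if_congr hiff rfl rfl
          · simp [hql]

lemma lowLoop_spec (comb : Int → Int → Int) (w : Int → Int)
    (dct : PySem.Dict Int (Option Int)) :
    ∀ (low : List Int), (∀ q ∈ low, dct.get? q = some (some (w q))) →
    ∀ (r0 m0 : Int),
      low.foldl
        (fun (acc : Option (Int × Int)) p =>
          acc.bind (fun rm =>
            match dct.get? p with
            | some (some v) => some (comb rm.1 v, rm.2 + 1)
            | _ => none))
        (some (r0, m0))
      = some (low.foldl (fun r p => comb r (w p)) r0, m0 + low.length) := by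
  intro low
  induction low with
  | nil => intro _ r0 m0; simp
  | cons p l ih =>
    intro hd r0 m0
    rw [List.foldl_cons, List.foldl_cons]
    have hp := hd p (by simp)
    rw [show ((some (r0, m0)).bind (fun rm =>
          match dct.get? p with
          | some (some v) => some (comb rm.1 v, rm.2 + 1)
          | _ => none)) = some (comb r0 (w p), m0 + 1) by rw [Option.bind_some, hp]]
    rw [ih (fun q hq => hd q (by simp [hq])) (comb r0 (w p)) (m0 + 1)]
    congr 1
    rw [List.length_cons]
    push_cast
    ring_nf

lemma prodpow (base : Int) : ∀ (low : List Int) (E : Nat),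
    low.foldl (fun r q => r * base ^ (2 ^ q.toNat)) (base ^ E)
      = base ^ (E + ((low.map (fun p => 2 ^ p.toNat)).sum)) := by
  intro low
  induction low with
  | nil => intro E; simp
  | cons p l ih =>
    intro E
    rw [List.foldl_cons, show base ^ E * base ^ (2 ^ p.toNat) = base ^ (E + 2 ^ p.toNat) from
      (pow_add base E (2 ^ p.toNat)).symm, ih]
    simp [Nat.add_assoc]

lemma prodpow_mod (base M : Int) : ∀ (low : List Int) (E : Nat),
    low.foldl (fun r q => r * (base ^ (2 ^ q.toNat) % M) % M) (base ^ E % M)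
      = base ^ (E + ((low.map (fun p => 2 ^ p.toNat)).sum)) % M := by
  intro low
  induction low with
  | nil => intro E; simp
  | cons p l ih =>
    intro E
    rw [List.foldl_cons, show base ^ E % M * (base ^ (2 ^ p.toNat) % M) % M
        = base ^ (E + 2 ^ p.toNat) % M from by
      rw [← Int.mul_emod, ← pow_add], ih]
    simp [Nat.add_assoc]

lemma bits_decomp (power : Int) (hp : 1 ≤ power) :
    ∃ h low, getNotZeroBitPositions power = h :: low ∧ 0 ≤ h ∧
      (∀ q ∈ low, 0 ≤ q) ∧ (∀ q ∈ low, q < h) ∧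
      2 ^ h.toNat + ((low.map (fun p => 2 ^ p.toNat)).sum) = power.toNat := by
  have hnn : (0:Int) ≤ power := by omega
  have hg : getNotZeroBitPositions power = (bitsFrom power.toNat 0).reverse := by
    unfold getNotZeroBitPositions
    rw [show (1 : Int) = 2 ^ (0:Nat) from by norm_num,
        show (0 : Int) = ((0:Nat) : Int) from rfl, gnzAux_eq power hnn 0 []]
    simp
  set bl := bitsFrom power.toNat 0 with hbl
  have hsum : ((bl.map (fun p => 2 ^ p.toNat)).sum) = power.toNat := by
    rw [hbl, bitsFrom_sum]; simp
  have hne : bl ≠ [] := by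
    intro h
    rw [h] at hsum
    simp at hsum
    omega
  have hnonneg : ∀ p ∈ bl, ((0:Nat) : Int) ≤ p ∧ 0 ≤ p := bitsFrom_nonneg power.toNat 0
  have hpw : bl.Pairwise (· < ·) := bitsFrom_pairwise power.toNat 0
  obtain ⟨l, a, hla⟩ : ∃ l a, bl = l ++ [a] := ⟨bl.dropLast, bl.getLast hne, (bl.dropLast_concat_getLast hne).symm⟩
  refine ⟨a, l.reverse, ?_, ?_, ?_, ?_, ?_⟩
  · rw [hg, hla]; simp
  · exact (hnonneg a (by rw [hla]; simp)).2
  · intro q hq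
    exact (hnonneg q (by rw [hla]; simp at hq ⊢; exact Or.inl hq)).2
  · intro q hq
    rw [hla, List.pairwise_append] at hpw
    exact hpw.2.2 q (by simpa using hq) a (by simp)
  · rw [hla] at hsum
    simp at hsum
    rw [List.map_reverse, List.sum_reverse]
    omega

lemma fastPowA_spec (base power : Int) (hp : 1 ≤ power) :
    ∃ mc, fastPowA base power = some (base ^ power.toNat, mc) := by
  obtain ⟨h, low, hg, hh0, hlow0, hlowlt, hsum⟩ := bits_decomp power hp
  have htoNat : ((h.toNat : Nat) : Int) = h := Int.toNat_of_nonneg hh0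
  have hd0 : ∀ q, ((low.foldl (fun d p => d.insert p none)
      (PySem.Dict.empty : PySem.Dict Int (Option Int))).get? q)
      = if q ∈ low then some none else none := by
    intro q
    rw [foldl_insert_none_get?]
    simp
  have hval : ∀ t, base ^ (2 ^ (t+1)) = (fun r => r * r) (base ^ (2 ^ t)) := by
    intro t
    simp only []
    rw [← pow_add]
    congr 1
    omega
  have hv0 : base ^ ((2:Nat) ^ (0:Nat)) = base := by norm_num
  obtain ⟨dct, h1, h2⟩ := sqLoop_spec (fun r => r * r) (fun t => base ^ (2 ^ t)) hval base hv0
      low hlow0 _ hd0 h.toNat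
  simp only [htoNat] at h1 h2
  have hd : ∀ q ∈ low, dct.get? q = some (some ((fun q => base ^ (2 ^ q.toNat)) q)) := by
    intro q hq
    rw [h2, if_pos ⟨hq, hlowlt q hq⟩]
  have h3 := lowLoop_spec (fun r v => r * v) (fun q => base ^ (2 ^ q.toNat)) dct low hd
      (base ^ (2 ^ h.toNat)) h
  have h4 := prodpow base low (2 ^ h.toNat)
  refine ⟨h + low.length, ?_⟩
  unfold fastPowA
  rw [if_neg (by omega), hg]
  simp only []
  have h1' : (PySem.List.pyRange 0 h 1).foldl
      (fun (st : Int × Int × PySem.Dict Int (Option Int)) p =>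
        let d' := if st.2.2.contains p then st.2.2.insert p (some st.1) else st.2.2
        (st.1 * st.1, st.2.1 + 1, d'))
      (base, 0, low.foldl (fun d p => d.insert p none) PySem.Dict.empty)
      = (base ^ (2 ^ h.toNat), h, dct) := h1
  rw [h1']
  have h3' : low.foldl
      (fun (acc : Option (Int × Int)) p =>
        acc.bind (fun rm =>
          match dct.get? p with
          | some (some v) => some (rm.1 * v, rm.2 + 1)
          | _ => none))
      (some (base ^ (2 ^ h.toNat), h))
      = some (low.foldl (fun r p => r * base ^ (2 ^ p.toNat)) (base ^ (2 ^ h.toNat)),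
          h + low.length) := h3
  rw [h3']
  have h4' : low.foldl (fun r p => r * base ^ (2 ^ p.toNat)) (base ^ (2 ^ h.toNat))
      = base ^ (2 ^ h.toNat + (low.map (fun p => 2 ^ p.toNat)).sum) := h4
  rw [h4', hsum]

lemma fastPowA_ten (d : Int) (hd : 0 ≤ d) :
    ∃ mc, fastPowA 10 d = some (10 ^ d.toNat, mc) := by
  by_cases h0 : d = 0
  · subst h0
    exact ⟨0, by unfold fastPowA; simp⟩
  · exact fastPowA_spec 10 d (by omega)

lemma fastPow2A_spec (base power d : Int) (hp : 1 ≤ power) (hd : 0 ≤ d) :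
    ∃ mc, fastPow2A base power d = some (base ^ power.toNat % 10 ^ d.toNat, mc) := by
  obtain ⟨mc0, hten⟩ := fastPowA_ten d hd
  set M : Int := 10 ^ d.toNat with hM
  obtain ⟨h, low, hg, hh0, hlow0, hlowlt, hsum⟩ := bits_decomp power hp
  have htoNat : ((h.toNat : Nat) : Int) = h := Int.toNat_of_nonneg hh0
  have hd0 : ∀ q, ((low.foldl (fun d p => d.insert p none)
      (PySem.Dict.empty : PySem.Dict Int (Option Int))).get? q)
      = if q ∈ low then some none else none := by
    intro q
    rw [foldl_insert_none_get?]
    simp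
  have hval : ∀ t, base ^ (2 ^ (t+1)) % M = (fun r => r * r % M) (base ^ (2 ^ t) % M) := by
    intro t
    simp only []
    rw [← Int.mul_emod, ← pow_add]
    congr 2
    omega
  have hv0 : base ^ ((2:Nat) ^ (0:Nat)) % M = base % M := by norm_num
  obtain ⟨dct, h1, h2⟩ := sqLoop_spec (fun r => r * r % M) (fun t => base ^ (2 ^ t) % M) hval
      (base % M) hv0 low hlow0 _ hd0 h.toNat
  simp only [htoNat] at h1 h2
  have hdl : ∀ q ∈ low, dct.get? q = some (some ((fun q => base ^ (2 ^ q.toNat) % M) q)) := by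
    intro q hq
    rw [h2, if_pos ⟨hq, hlowlt q hq⟩]
  have h3 := lowLoop_spec (fun r v => r * v % M) (fun q => base ^ (2 ^ q.toNat) % M) dct low hdl
      (base ^ (2 ^ h.toNat) % M) h
  have h4 := prodpow_mod base M low (2 ^ h.toNat)
  refine ⟨h + low.length, ?_⟩
  unfold fastPow2A
  rw [if_neg (by omega), hten, hg]
  simp only []
  have h1' : (PySem.List.pyRange 0 h 1).foldl
      (fun (st : Int × Int × PySem.Dict Int (Option Int)) p =>
        let d' := if st.2.2.contains p then st.2.2.insert p (some st.1) else st.2.2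
        (st.1 * st.1 % M, st.2.1 + 1, d'))
      (base % M, 0, low.foldl (fun d p => d.insert p none) PySem.Dict.empty)
      = (base ^ (2 ^ h.toNat) % M, h, dct) := h1
  rw [h1']
  have h3' : low.foldl
      (fun (acc : Option (Int × Int)) p =>
        acc.bind (fun rm =>
          match dct.get? p with
          | some (some v) => some (rm.1 * v % M, rm.2 + 1)
          | _ => none))
      (some (base ^ (2 ^ h.toNat) % M, h))
      = some (low.foldl (fun r p => r * (base ^ (2 ^ p.toNat) % M) % M) (base ^ (2 ^ h.toNat) % M),
          h + low.length) := h3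
  rw [h3']
  have h4' : low.foldl (fun r p => r * (base ^ (2 ^ p.toNat) % M) % M) (base ^ (2 ^ h.toNat) % M)
      = base ^ (2 ^ h.toNat + (low.map (fun p => 2 ^ p.toNat)).sum) % M := h4
  rw [h4', hsum]

lemma pow_emod_int (b : Int) (k : Nat) (m : Int) : (b % m) ^ k % m = b ^ k % m := by
  induction k with
  | zero => simp
  | succ k ih =>
    rw [pow_succ, pow_succ, Int.mul_emod, ih, Int.emod_emod_of_dvd _ dvd_rfl, ← Int.mul_emod]

lemma powLoop_spec (m : Int) : ∀ (n : Nat), 1 ≤ n → ∀ (res b : Int),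
    powLoop m res b (n : Int) = res * b ^ n % m := by
  intro n
  induction n using Nat.strong_induction_on with
  | _ n ih =>
    intro hn res b
    rw [powLoop, dif_pos (by exact_mod_cast hn)]
    rw [PySem.Int.mod_eq_emod_of_pos (by omega), PySem.Int.floordiv_eq_ediv_of_pos (by omega)]
    have hmod : ((n : Int) % 2 = 1) ↔ n % 2 = 1 := by omega
    have hdiv : ((n : Int) / 2) = ((n / 2 : Nat) : Int) := by omega
    by_cases h2 : n / 2 = 0
    · have hn1 : n = 1 := by omega
      subst hn1
      rw [if_pos (by norm_num), hdiv, show ((1/2 : Nat) : Int) = 0 from rfl]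
      rw [powLoop, dif_neg (by norm_num), pow_one]
    · have hsq : ∀ k : Nat, (b * b) ^ k = b ^ (2 * k) := by
        intro k
        rw [show b * b = b ^ 2 from by ring, ← pow_mul]
      by_cases hodd : n % 2 = 1
      · rw [if_pos (hmod.mpr hodd), hdiv, ih (n / 2) (by omega) (by omega) (res * b % m) (b * b % m)]
        rw [Int.mul_emod, Int.emod_emod_of_dvd _ dvd_rfl, pow_emod_int, ← Int.mul_emod,
            hsq, mul_assoc, ← pow_succ', show 2 * (n / 2) + 1 = n from by omega]
      · rw [if_neg (by rw [hmod]; omega), hdiv, ih (n / 2) (by omega) (by omega) res (b * b % m)]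
        rw [Int.mul_emod, pow_emod_int, ← Int.mul_emod, hsq,
            show 2 * (n / 2) = n from by omega]

lemma powLoop_term (M i : Int) (hi : 1 ≤ i) : powLoop M 1 i i = i ^ i.toNat % M := by
  have h := powLoop_spec M i.toNat (by omega) 1 i
  rw [Int.toNat_of_nonneg (by omega)] at h
  rw [h, one_mul]

lemma outer_loop (d : Int) (hd : 0 ≤ d) (M : Int) (hM : M = 10 ^ d.toNat) :
    ∀ (l : List Int), (∀ i ∈ l, 1 ≤ i) → ∀ (s0 : Int),
      l.foldl (fun (acc : Option Int) i =>
          acc.bind (fun s =>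
            match fastPow2A i i d with
            | none => none
            | some t => some ((s + t.1) % M)))
        (some s0)
      = some (l.foldl (fun total i => (total + powLoop M 1 i i) % M) s0) := by
  intro l
  induction l with
  | nil => intro _ s0; simp
  | cons i l ih =>
    intro hmem s0
    have hi : 1 ≤ i := hmem i (by simp)
    obtain ⟨mc, hfp⟩ := fastPow2A_spec i i d hi hd
    rw [List.foldl_cons, List.foldl_cons]
    have hstep : ((some s0).bind (fun s =>
        match fastPow2A i i d with
        | none => none
        | some t => some ((s + t.1) % M)))
        = some ((s0 + i ^ i.toNat % 10 ^ d.toNat) % M) := by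
      rw [Option.bind_some, hfp]
    rw [hstep, ih (fun j hj => hmem j (by simp [hj])), powLoop_term M i hi, hM]

-- ===== VERDICT (by name: the statement is the Claim_ definition above) =====
theorem funcOptimized_spec : Claim_equal_funcOptimized := by
  intro x d _ hd
  unfold Spec_funcOptimized

  obtain ⟨mc0, hten⟩ := fastPowA_ten d hd
  unfold funcOptimized
  rw [hten]
  have hmem : ∀ i ∈ PySem.List.pyRange 1 x 1, 1 ≤ i := by
    intro i hi
    exact (PySem.List.mem_pyRange_one.mp hi).1
  have h := outer_loop d hd (10 ^ d.toNat) rfl (PySem.List.pyRange 1 x 1) hmem 0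
  have h' : (PySem.List.pyRange 1 x 1).foldl
      (fun (acc : Option Int) i =>
        acc.bind (fun s =>
          match fastPow2A i i d with
          | none => none
          | some t => some ((s + t.1) % (10 ^ d.toNat, mc0).1)))
      (some 0)
      = some ((PySem.List.pyRange 1 x 1).foldl
          (fun total i => (total + powLoop (10 ^ d.toNat) 1 i i) % 10 ^ d.toNat) 0) := h
  show ((PySem.List.pyRange 1 x 1).foldl
      (fun (acc : Option Int) i =>
        acc.bind (fun s =>
          match fastPow2A i i d with
          | none => none
          | some t => some ((s + t.1) % (10 ^ d.toNat, mc0).1)))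
      (some 0)).getD 0 = funcOptimized_alt x d
  rw [h']
  rfl
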